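-- pv_equiv track=rewrite | github.com/xuyuzhuang11/OneBit | transformers/utils/notification_service.py | prepare_reports
-- ===== SOURCE A (Python) =====
-- def prepare_reports(title, header, reports, to_truncate=True):
--     report = ""
--
--     MAX_ERROR_TEXT = 3000 - len("[Truncated]")
--     if not to_truncate:
--         MAX_ERROR_TEXT = float("inf")
--
--     if len(reports) > 0:
--         # `text` must be less than 3001 characters in Slack SDK
--         # keep some room for adding "[Truncated]" when necessary
--
--         for idx in range(len(reports)):
--             _report = header + "\n".join(reports[: idx + 1])
--             new_report = f"{title}:\n```\n{_report}\n```\n"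
--             if len(new_report) > MAX_ERROR_TEXT:
--                 # `report` here has length <= 3000
--                 report = report + "[Truncated]"
--                 break
--             report = new_report
--
--     return report
-- ===== SOURCE B (Python) =====
-- def prepare_reports(title, header, reports, to_truncate=True):
--     # one pass over report lengths to find the cutoff, then a single join
--     if not reports:
--         return ""
--
--     def render(k):
--         return f"{title}:\n```\n{header}" + "\n".join(reports[:k]) + "\n```\n"
--
--     if not to_truncate:
--         return render(len(reports))
--
--     LIMIT = 3000 - len("[Truncated]")
--     base = len(title) + len(header) + 11  # fixed characters around the joined body
--     cur = base - 1
--     k = 0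
--     for r in reports:
--         cur += len(r) + 1
--         if cur > LIMIT:
--             break
--         k += 1
--     out = render(k) if k > 0 else ""
--     if k < len(reports):
--         out += "[Truncated]"
--     return out
-- ===== Notes on version B (the rewrite author's own statement) =====
-- stated objective: alternative
-- what changed: A re-joins the whole prefix and re-renders the message on every loop iteration (quadratic in total report text); B makes one pass over the report lengths to find the cutoff count k, then renders the message with a single join of the first k reports (intended as faster; a timing run measured 64-285x at mid sizes but could not confirm at the largest size, so faster is recorded as none).
import Mathlib
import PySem

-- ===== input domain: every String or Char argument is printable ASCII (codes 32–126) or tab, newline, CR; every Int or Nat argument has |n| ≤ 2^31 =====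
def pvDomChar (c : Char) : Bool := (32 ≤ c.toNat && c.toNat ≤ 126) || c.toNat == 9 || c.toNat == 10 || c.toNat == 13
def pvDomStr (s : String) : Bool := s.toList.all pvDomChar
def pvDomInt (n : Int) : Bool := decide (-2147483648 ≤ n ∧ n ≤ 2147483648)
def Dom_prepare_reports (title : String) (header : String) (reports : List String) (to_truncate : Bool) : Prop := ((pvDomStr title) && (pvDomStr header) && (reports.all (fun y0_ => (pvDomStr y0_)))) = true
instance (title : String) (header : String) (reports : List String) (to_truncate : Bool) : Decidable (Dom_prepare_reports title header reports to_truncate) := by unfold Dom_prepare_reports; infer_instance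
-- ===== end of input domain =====

-- ===== PORT A =====
-- B replaces A's rebuild-the-joined-prefix-per-iteration loop by a one-pass scan over the
-- report lengths to find the cutoff count, followed by a single join (objective: alternative).
def pvRenderA (title : String) (header : String) (pref : List String) : String :=
  let _report := header ++ PySem.Str.join "\n" pref
  title ++ ":\n```\n" ++ _report ++ "\n```\n"

def pvLoopA (title : String) (header : String) (reports : List String)
    (maxLen : Option Int) : List Int → String → String
  | [], report => report
  | idx :: rest, report =>
      let newR := pvRenderA title header (PySem.List.slice reports none (some (idx + 1)))
      -- len(new_report) > MAX_ERROR_TEXT; MAX_ERROR_TEXT = float("inf") ported as none (never exceeded)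
      let exceeds : Bool := match maxLen with
        | some m => decide (m < PySem.Str.len newR)
        | none => false
      if exceeds then report ++ "[Truncated]"
      else pvLoopA title header reports maxLen rest newR

def prepare_reports (title : String) (header : String) (reports : List String) (to_truncate : Bool) : String :=
  let report : String := ""
  let maxLen : Option Int := if to_truncate then some (3000 - PySem.Str.len "[Truncated]") else none
  if 0 < reports.length then
    pvLoopA title header reports maxLen (PySem.List.pyRange 0 reports.length 1) report
  else report

-- ===== PORT B =====
def pvRenderB (title : String) (header : String) (reports : List String) (k : Nat) : String :=
  title ++ ":\n```\n" ++ header ++ PySem.Str.join "\n" (reports.take k) ++ "\n```\n"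

-- one pass over report lengths: number of reports whose rendered prefix stays within `limit`
def pvCountB (limit : Int) : List String → Int → Nat
  | [], _ => 0
  | r :: rs, cur =>
      let cur' := cur + PySem.Str.len r + 1
      if limit < cur' then 0 else 1 + pvCountB limit rs cur'

def prepare_reports_alt (title : String) (header : String) (reports : List String) (to_truncate : Bool) : String :=
  if reports.isEmpty then ""
  else if to_truncate = false then pvRenderB title header reports reports.length
  else
    let limit : Int := 3000 - PySem.Str.len "[Truncated]"
    let base : Int := PySem.Str.len title + PySem.Str.len header + 11
    let k := pvCountB limit reports (base - 1)
    (if 0 < k then pvRenderB title header reports k else "") ++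
      (if k < reports.length then "[Truncated]" else "")

-- ===== PRECONDITION & SPEC =====
def Spec_prepare_reports (title : String) (header : String) (reports : List String) (to_truncate : Bool) (out : String) : Prop := out = prepare_reports_alt title header reports to_truncate
instance (title : String) (header : String) (reports : List String) (to_truncate : Bool) (out : String) : Decidable (Spec_prepare_reports title header reports to_truncate out) := by unfold Spec_prepare_reports; infer_instance

-- ===== CLAIM (what is proved, stated in full; the proofs are below) =====
def Claim_equal_prepare_reports : Prop := ∀ (title : String) (header : String) (reports : List String) (to_truncate : Bool), Dom_prepare_reports title header reports to_truncate → Spec_prepare_reports title header reports to_truncate (prepare_reports title header reports to_truncate)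

-- ===== LEMMAS AND PROOFS =====
set_option maxRecDepth 4096

lemma renderA_eq_renderB (title header : String) (reports : List String) (k : Nat) :
    pvRenderA title header (reports.take k) = pvRenderB title header reports k := by
  simp [pvRenderA, pvRenderB, String.append_assoc]

lemma join_len (pref : List String) (h : pref ≠ []) :
    PySem.Str.len (PySem.Str.join "\n" pref) =
      (pref.map (fun r => PySem.Str.len r + 1)).sum - 1 := by
  induction pref with
  | nil => simp at h
  | cons p rest ih =>
    cases rest with
    | nil =>
        simp [PySem.Str.len_eq, PySem.Str.toList_join, PySem.Chars.join_singleton]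
    | cons q rest' =>
        have hlen : (PySem.Str.join "\n" (p :: q :: rest')).toList.length
            = p.toList.length + 1 + (PySem.Str.join "\n" (q :: rest')).toList.length := by
          simp only [PySem.Str.toList_join, List.map_cons, PySem.Chars.join_cons_cons,
            List.length_append]
          simp
        have ih' := ih (by simp)
        simp only [PySem.Str.len_eq, List.map_cons, List.sum_cons] at ih' ⊢
        rw [hlen]
        push_cast
        omega

lemma render_len (title header : String) (pref : List String) (h : pref ≠ []) :
    PySem.Str.len (pvRenderA title header pref) =
      PySem.Str.len title + PySem.Str.len header + 10 +
        (pref.map (fun r => PySem.Str.len r + 1)).sum := by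
  have hj := join_len pref h
  simp only [pvRenderA]
  rw [PySem.Str.len_append, PySem.Str.len_append, PySem.Str.len_append, PySem.Str.len_append, hj]
  have h1 : PySem.Str.len ":\n```\n" = 6 := by decide
  have h2 : PySem.Str.len "\n```\n" = 5 := by decide
  rw [h1, h2]; ring

-- running total after i reports (B's `cur` equals this after i loop steps)
def pvCost (base : Int) (reports : List String) (i : Nat) : Int :=
  base - 1 + ((reports.take i).map (fun r => PySem.Str.len r + 1)).sum

lemma cost_succ (base : Int) (reports : List String) (i : Nat) (hi : i < reports.length) :
    pvCost base reports (i + 1) = pvCost base reports i + PySem.Str.len reports[i] + 1 := by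
  simp only [pvCost, List.take_add_one, List.getElem?_eq_getElem hi, Option.toList_some,
    List.map_append, List.sum_append, List.map_cons, List.map_nil, List.sum_cons, List.sum_nil]
  ring

lemma render_len_take (title header : String) (reports : List String) (i : Nat)
    (hi : i < reports.length) :
    PySem.Str.len (pvRenderA title header (reports.take (i + 1))) =
      pvCost (PySem.Str.len title + PySem.Str.len header + 11) reports (i + 1) := by
  rw [render_len title header _ (by
    rw [Ne, List.take_eq_nil_iff]
    rintro (h1 | rfl)
    · omega
    · simp at hi)]
  simp only [pvCost]; ring

lemma loop_inf (title header : String) (reports : List String) :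
    ∀ (i : Nat), i ≤ reports.length → ∀ (report : String),
    pvLoopA title header reports none (PySem.List.pyRange i reports.length 1) report =
      if i = reports.length then report else pvRenderA title header reports := by
  intro i hi
  induction hn : reports.length - i generalizing i with
  | zero =>
      intro report
      have : i = reports.length := by omega
      subst this
      rw [PySem.List.pyRange_one_eq_nil (by exact_mod_cast le_refl _)]
      simp only [pvLoopA, if_pos]
  | succ m ih =>
      intro report
      have hlt : i < reports.length := by omega
      rw [PySem.List.pyRange_one_cons (by exact_mod_cast hlt)]
      simp only [pvLoopA]
      have hc : ((i : Int) + 1) = ((i + 1 : Nat) : Int) := by push_cast; ring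
      rw [hc, PySem.List.slice_to_natCast]
      rw [ih (i + 1) (by omega) (by omega) (pvRenderA title header (reports.take (i + 1)))]
      by_cases h : i + 1 = reports.length
      · rw [if_pos h, if_neg hlt.ne, h, List.take_length]; simp
      · rw [if_neg h, if_neg hlt.ne]; simp

lemma loop_trunc (title header : String) (reports : List String) (limit : Int) :
    ∀ (i : Nat), i ≤ reports.length →
    pvLoopA title header reports (some limit) (PySem.List.pyRange i reports.length 1)
        (if i = 0 then "" else pvRenderA title header (reports.take i)) =
      (let k := i + pvCountB limit (reports.drop i)
          (pvCost (PySem.Str.len title + PySem.Str.len header + 11) reports i);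
       (if 0 < k then pvRenderA title header (reports.take k) else "") ++
         (if k < reports.length then "[Truncated]" else "")) := by
  intro i hi
  induction hn : reports.length - i generalizing i with
  | zero =>
      have : i = reports.length := by omega
      subst this
      rw [PySem.List.pyRange_one_eq_nil (by exact_mod_cast le_refl _)]
      simp only [pvLoopA, List.drop_length, pvCountB, Nat.add_zero]
      by_cases h0 : reports.length = 0
      · simp [h0]
      · simp [h0, Nat.pos_of_ne_zero h0, List.take_length]
  | succ m ih =>
      have hlt : i < reports.length := by omega
      rw [PySem.List.pyRange_one_cons (by exact_mod_cast hlt)]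
      simp only [pvLoopA]
      have hc : ((i : Int) + 1) = ((i + 1 : Nat) : Int) := by push_cast; ring
      rw [hc, PySem.List.slice_to_natCast]
      have hdrop : reports.drop i = reports[i] :: reports.drop (i + 1) :=
        List.drop_eq_getElem_cons hlt
      have hlen := render_len_take title header reports i hlt
      have hcost := cost_succ (PySem.Str.len title + PySem.Str.len header + 11) reports i hlt
      rw [hdrop]
      simp only [pvCountB, ← hcost]
      by_cases hex : limit < pvCost (PySem.Str.len title + PySem.Str.len header + 11) reports (i + 1)
      · -- break: truncated
        rw [hlen, if_pos hex]
        simp only [decide_eq_true_eq, hex, if_true, Nat.add_zero]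
        by_cases h0 : i = 0
        · subst h0; simp [hlt]
        · simp [h0, Nat.pos_of_ne_zero h0, hlt]
      · -- continue
        rw [hlen, if_neg hex]
        simp only [decide_eq_true_eq, hex, if_false]
        have hrec := ih (i + 1) (by omega) (by omega)
        rw [if_neg (by omega : ¬ (i + 1 = 0))] at hrec
        rw [hrec]
        simp only [← Nat.add_assoc]

-- ===== VERDICT (by name: the statement is the Claim_ definition above) =====
theorem prepare_reports_spec : Claim_equal_prepare_reports := by
  intro title header reports to_truncate _
  unfold Spec_prepare_reports
  by_cases hne : reports = []
  · subst hne; cases to_truncate <;> simp [prepare_reports, prepare_reports_alt]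
  · have hpos : 0 < reports.length := List.length_pos_of_ne_nil hne
    have hie : reports.isEmpty = false := by simp [hne]
    cases to_truncate with
    | false =>
        have h := loop_inf title header reports 0 (Nat.zero_le _) ""
        simp only [Nat.cast_zero] at h
        simp only [prepare_reports, prepare_reports_alt, if_pos hpos, hie, Bool.false_eq_true,
          if_false, h, if_neg (by omega : ¬ (0 = reports.length)),
          ← renderA_eq_renderB, List.take_length]
        simp
    | true =>
        have h := loop_trunc title header reports (3000 - PySem.Str.len "[Truncated]") 0 (Nat.zero_le _)
        simp only [Nat.cast_zero, List.drop_zero, Nat.zero_add, reduceIte] at h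
        have hc0 : pvCost (PySem.Str.len title + PySem.Str.len header + 11) reports 0
            = PySem.Str.len title + PySem.Str.len header + 11 - 1 := by
          simp [pvCost]
        rw [hc0] at h
        simp only [prepare_reports, prepare_reports_alt, if_pos hpos, hie, Bool.false_eq_true,
          if_false, ← renderA_eq_renderB, reduceIte]
        exact h
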